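-- pv_equiv track=rewrite | github.com/ljyljy/LeetCode-2020 | BFS/q1030-matrix-cells-in-distance-order.py | allCellsDistOrder2
-- ===== SOURCE A (Python) =====
-- from typing import List
--
-- def allCellsDistOrder2(R, C, r0, c0) -> List[List[int]]:
--     import collections  # ↓ ranR, ranC = [0, R-1], [0, C-1]
--     bucket = collections.defaultdict(list)
--     dist_key = lambda r1, c1, r0, c0: abs(r1 - r0) + abs(c1 - c0)
--     for i in range(R):
--         for j in range(C):  # ❤注意是append！不是等号（∵等距离的可能有多个）
--             bucket[dist_key(i, j, r0, c0)].append([i, j])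
--     # ❤对字典排序：https://www.cnblogs.com/wqbin/p/10222768.html
--     rst = []
--     # 求法1：
--     dists = sorted(bucket.keys())  # 按升序排列
--     for dist in dists:
--         rst.extend(bucket[dist])  # # ∵defaultdict ∴key不存在不报错！
--     # 求法2：不推荐，遍历效率不高，很多[0,maxDist]可能不存在
--     # maxDist = max(r0-0, R-1 -r0) + max(c0-0, C-1 -c0)
--     # for i in range(maxDist+1):  # ∵defaultdict ∴key不存在，返回[]
--     #     rst.extend(bucket[i])
--     return rst
-- ===== SOURCE B (Python) =====
-- from typing import List
--
-- def allCellsDistOrder2(R, C, r0, c0) -> List[List[int]]: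
--     cells = [[i, j] for i in range(R) for j in range(C)]
--     return sorted(cells, key=lambda c: abs(c[0] - r0) + abs(c[1] - c0))
-- ===== Notes on version B (the rewrite author's own statement) =====
-- stated objective: simpler
-- what changed: Replaces the defaultdict bucket-partition plus sorted-keys concatenation with one comprehension building the cells in row-major order followed by a single stable sort on Manhattan distance.
import Mathlib
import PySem

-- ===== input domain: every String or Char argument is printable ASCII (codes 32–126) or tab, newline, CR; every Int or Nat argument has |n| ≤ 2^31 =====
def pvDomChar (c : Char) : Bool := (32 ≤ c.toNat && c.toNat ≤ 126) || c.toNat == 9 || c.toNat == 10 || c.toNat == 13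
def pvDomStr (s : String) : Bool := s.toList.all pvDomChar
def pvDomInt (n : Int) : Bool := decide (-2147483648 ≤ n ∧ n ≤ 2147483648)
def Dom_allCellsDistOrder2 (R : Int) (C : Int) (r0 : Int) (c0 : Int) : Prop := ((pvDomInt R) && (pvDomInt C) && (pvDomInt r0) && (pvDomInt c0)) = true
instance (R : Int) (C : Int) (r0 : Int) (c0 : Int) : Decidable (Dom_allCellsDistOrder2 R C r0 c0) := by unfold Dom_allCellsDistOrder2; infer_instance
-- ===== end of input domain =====

-- B replaces A's defaultdict bucket-partition + sorted-keys concatenation by one row-major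
-- comprehension followed by a single stable sort on Manhattan distance (objective: simpler).

-- ===== PORT A =====
def allCellsDistOrder2 (R : Int) (C : Int) (r0 : Int) (c0 : Int) : List (List Int) :=
  let distKey : Int → Int → Int → Int → Int := fun r1 c1 r0' c0' => |r1 - r0'| + |c1 - c0'|
  let bucket : PySem.Dict Int (List (List Int)) :=
    (PySem.List.pyRange 0 R 1).foldl (fun b i =>
      (PySem.List.pyRange 0 C 1).foldl (fun b j =>
        b.modify (distKey i j r0 c0) [] (fun l => l ++ [[i, j]])) b) PySem.Dict.empty
  let dists := PySem.List.sorted bucket.keys (fun d => d) false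
  dists.foldl (fun rst dist => rst ++ bucket.getD dist []) []

-- ===== PORT B =====
def allCellsDistOrder2_alt (R : Int) (C : Int) (r0 : Int) (c0 : Int) : List (List Int) :=
  let cells := (PySem.List.pyRange 0 R 1).flatMap (fun i =>
    (PySem.List.pyRange 0 C 1).map (fun j => [i, j]))
  PySem.List.sorted cells
    (fun c => |PySem.List.pyGetD c 0 0 - r0| + |PySem.List.pyGetD c 1 0 - c0|) false

-- ===== PRECONDITION & SPEC =====
def Spec_allCellsDistOrder2 (R : Int) (C : Int) (r0 : Int) (c0 : Int) (out : List (List Int)) : Prop := out = allCellsDistOrder2_alt R C r0 c0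
instance (R : Int) (C : Int) (r0 : Int) (c0 : Int) (out : List (List Int)) : Decidable (Spec_allCellsDistOrder2 R C r0 c0 out) := by unfold Spec_allCellsDistOrder2; infer_instance

-- ===== CLAIM (what is proved, stated in full; the proofs are below) =====
def Claim_equal_allCellsDistOrder2 : Prop := ∀ (R : Int) (C : Int) (r0 : Int) (c0 : Int), Dom_allCellsDistOrder2 R C r0 c0 → Spec_allCellsDistOrder2 R C r0 c0 (allCellsDistOrder2 R C r0 c0)

-- ===== LEMMAS AND PROOFS =====

-- insertBy passes over a prefix none of whose elements trigger `before`.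
theorem insertBy_append_not_before {α : Type} (before : α → α → Bool) (x : α)
    (l r : List α) (h : ∀ z ∈ l, before x z = false) :
    PySem.List.insertBy before x (l ++ r) = l ++ PySem.List.insertBy before x r := by
  induction l with
  | nil => simp
  | cons z t ih =>
      simp only [List.cons_append, PySem.List.insertBy, h z (by simp)]
      simp only [Bool.false_eq_true, if_false]
      exact congrArg (z :: ·) (ih (fun w hw => h w (by simp [hw])))

-- insertBy goes to the very front when every element triggers `before`.
theorem insertBy_all_before {α : Type} (before : α → α → Bool) (x : α)
    (l : List α) (h : ∀ z ∈ l, before x z = true) :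
    PySem.List.insertBy before x l = x :: l := by
  cases l with
  | nil => rfl
  | cons z t => simp [PySem.List.insertBy, h z (by simp)]

-- Inserting y into a concatenation of strictly key-increasing groups lands in y's group.
theorem ins_flatMap {α : Type} (key : α → Int) (y : α) :
    ∀ (S : List Int) (g : Int → List α),
      S.Pairwise (· < ·) →
      (∀ d ∈ S, ∀ c ∈ g d, key c = d) →
      (key y ∉ S → g (key y) = []) →
      PySem.List.insertBy (fun a b => decide (key a < key b)) y (S.flatMap g) =
        (if key y ∈ S then S
         else PySem.List.insertBy (fun a b => decide (a < b)) (key y) S).flatMap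
          (fun d => g d ++ (if key y = d then [y] else [])) := by
  intro S
  induction S with
  | nil =>
      intro g _ _ hfresh
      simp [PySem.List.insertBy, hfresh (by simp)]
  | cons d T ih =>
      intro g hpw hmem hfresh
      have hdT : ∀ d' ∈ T, d < d' := (List.pairwise_cons.mp hpw).1
      have hpwT : T.Pairwise (· < ·) := (List.pairwise_cons.mp hpw).2
      have hflat : (d :: T).flatMap g = g d ++ T.flatMap g := by simp
      rcases lt_trichotomy (key y) d with hlt | heq | hgt
      · -- key y < d : y goes in front, key y is a fresh key
        have hnot : key y ∉ d :: T := by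
          intro hm
          rcases List.mem_cons.mp hm with h | h
          · omega
          · have := hdT _ h; omega
        have hge : ∀ z ∈ (d :: T).flatMap g, key y < key z := by
          intro z hz
          rcases List.mem_flatMap.mp hz with ⟨d', hd', hzg⟩
          have hk := hmem d' hd' z hzg
          rcases List.mem_cons.mp hd' with h | h
          · omega
          · have := hdT _ h; omega
        rw [insertBy_all_before _ _ _ (fun z hz => by simpa using hge z hz)]
        rw [if_neg hnot]
        have hins : PySem.List.insertBy (fun a b => decide (a < b)) (key y) (d :: T)
            = key y :: d :: T := by
          simp [PySem.List.insertBy, hlt]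
        rw [hins]
        have hTcongr : T.flatMap (fun d' => g d' ++ (if key y = d' then [y] else []))
            = T.flatMap g := by
          apply List.flatMap_congr
          intro d' hd'
          have h1 := hdT _ hd'
          have : key y ≠ d' := by omega
          simp [this]
        have hned : key y ≠ d := by omega
        simp [List.flatMap_cons, hfresh hnot, hTcongr, hned]
      · -- key y = d : y is appended to group d
        have hmemS : key y ∈ d :: T := by simp [heq]
        rw [if_pos hmemS, hflat]
        have h1 : ∀ z ∈ g d, (fun a b => decide (key a < key b)) y z = false := by
          intro z hz
          have := hmem d (by simp) z hz
          simp; omega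
        rw [insertBy_append_not_before _ _ _ _ h1]
        have h2 : ∀ z ∈ T.flatMap g, key y < key z := by
          intro z hz
          rcases List.mem_flatMap.mp hz with ⟨d', hd', hzg⟩
          have := hmem d' (by simp [hd']) z hzg
          have := hdT _ hd'
          omega
        rw [insertBy_all_before _ _ _ (fun z hz => by simpa using h2 z hz)]
        simp only [List.flatMap_cons, if_pos heq]
        have hcongr : T.flatMap (fun d' => g d' ++ (if key y = d' then [y] else []))
            = T.flatMap g := by
          apply List.flatMap_congr
          intro d' hd'
          have := hdT _ hd'
          have : key y ≠ d' := by omega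
          simp [this]
        rw [hcongr]
        simp
      · -- d < key y : skip group d, recurse into T
        have hne : key y ≠ d := by omega
        have h1 : ∀ z ∈ g d, (fun a b => decide (key a < key b)) y z = false := by
          intro z hz
          have := hmem d (by simp) z hz
          simp; omega
        rw [hflat, insertBy_append_not_before _ _ _ _ h1]
        have ihT := ih g hpwT (fun d' hd' => hmem d' (by simp [hd']))
          (fun hn => hfresh (by simp [hne, hn]))
        rw [ihT]
        by_cases hmemT : key y ∈ T
        · rw [if_pos hmemT, if_pos (by simp [hmemT])]
          simp [hne]
        · rw [if_neg hmemT, if_neg (by simp [hne, hmemT])]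
          have hins : PySem.List.insertBy (fun a b => decide (a < b)) (key y) (d :: T)
              = d :: PySem.List.insertBy (fun a b => decide (a < b)) (key y) T := by
            simp [PySem.List.insertBy]; omega
          rw [hins]
          simp [hne]

-- A stable sort is the concatenation, over the sorted distinct keys, of the key-groups.
theorem stable_sort_groups {α : Type} (key : α → Int) (xs : List α) :
    PySem.List.sorted xs key false =
      (PySem.List.sorted (PySem.Set.ofList (xs.map key)) (fun d => d) false).flatMap
        (fun d => xs.filter (fun c => key c == d)) := by
  induction xs using List.reverseRecOn with
  | nil => rfl
  | append_singleton xs y ih =>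
      have hL : PySem.List.sorted (xs ++ [y]) key false
          = PySem.List.insertBy (fun a b => decide (key a < key b)) y
              (PySem.List.sorted xs key false) := by
        rw [PySem.List.sorted_eq_foldl_insertBy, List.foldl_append,
          ← PySem.List.sorted_eq_foldl_insertBy]
        rfl
      rw [hL, ih]
      set S := PySem.List.sorted (PySem.Set.ofList (xs.map key)) (fun d => d) false with hS
      have hSmem : ∀ d, d ∈ S ↔ d ∈ xs.map key := by
        intro d
        rw [hS, PySem.List.mem_sorted, PySem.Set.mem_ofList]
      have hpw : S.Pairwise (· < ·) := PySem.List.sorted_ofList_pairwise_lt _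
      have hmem : ∀ d ∈ S, ∀ c ∈ xs.filter (fun c => key c == d), key c = d := by
        intro d _ c hc
        have := (List.mem_filter.mp hc).2
        simpa using this
      have hfresh : key y ∉ S → xs.filter (fun c => key c == key y) = [] := by
        intro hn
        rw [List.filter_eq_nil_iff]
        intro c hc hbc
        exact hn ((hSmem (key y)).mpr (List.mem_map.mpr ⟨c, hc, by simpa using hbc⟩))
      rw [ins_flatMap key y S _ hpw hmem hfresh]
      -- right-hand side: the new sorted key set and the new groups
      have hkeys : PySem.Set.ofList ((xs ++ [y]).map key)
          = PySem.Set.add (PySem.Set.ofList (xs.map key)) (key y) := by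
        simp [PySem.Set.ofList, List.foldl_append]
      have hgroups : ∀ d, (xs ++ [y]).filter (fun c => key c == d)
          = xs.filter (fun c => key c == d) ++ (if key y = d then [y] else []) := by
        intro d
        rw [List.filter_append]
        congr 1
        by_cases h : key y = d <;> simp [h]
      by_cases hin : key y ∈ S
      · rw [if_pos hin]
        have hcont : (PySem.Set.ofList (xs.map key)).contains (key y) = true := by
          have : key y ∈ PySem.Set.ofList (xs.map key) :=
            (PySem.Set.mem_ofList _ _).mpr ((hSmem (key y)).mp hin)
          simpa using this
        rw [hkeys]
        simp only [PySem.Set.add, hcont, if_pos]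
        rw [← hS]
        exact (List.flatMap_congr (fun d _ => (hgroups d).symm))
      · rw [if_neg hin]
        have hcont : (PySem.Set.ofList (xs.map key)).contains (key y) = false := by
          have : key y ∉ PySem.Set.ofList (xs.map key) := by
            intro hm
            exact hin ((hSmem (key y)).mpr ((PySem.Set.mem_ofList _ _).mp hm))
          simpa using this
        rw [hkeys]
        simp only [PySem.Set.add, hcont]
        rw [if_neg (by simp)]
        have hsortApp : PySem.List.sorted (PySem.Set.ofList (xs.map key) ++ [key y]) (fun d => d) false
            = PySem.List.insertBy (fun a b => decide (a < b)) (key y) S := by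
          rw [PySem.List.sorted_eq_foldl_insertBy, List.foldl_append,
            ← PySem.List.sorted_eq_foldl_insertBy, ← hS]
          rfl
        rw [hsortApp]
        exact (List.flatMap_congr (fun d _ => (hgroups d).symm))

-- ===== VERDICT (by name: the statement is the Claim_ definition above) =====
theorem allCellsDistOrder2_spec : Claim_equal_allCellsDistOrder2 := by
  intro R C r0 c0 _
  unfold Spec_allCellsDistOrder2 allCellsDistOrder2 allCellsDistOrder2_alt
  simp only []
  set key : List Int → Int :=
    fun c => |PySem.List.pyGetD c 0 0 - r0| + |PySem.List.pyGetD c 1 0 - c0| with hkey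
  set cells : List (List Int) := (PySem.List.pyRange 0 R 1).flatMap (fun i =>
    (PySem.List.pyRange 0 C 1).map (fun j => [i, j])) with hcells
  have hkeyij : ∀ i j : Int, key [i, j] = |i - r0| + |j - c0| := by
    intro i j
    simp [hkey, PySem.List.pyGetD, PySem.List.pyGet?, PySem.List.pyIdx?]
  -- A's nested loop is the grouping fold over the (distance, cell) pairs
  have hbucket :
      (PySem.List.pyRange 0 R 1).foldl (fun b i =>
        (PySem.List.pyRange 0 C 1).foldl (fun b j =>
          b.modify (|i - r0| + |j - c0|) [] (fun l => l ++ [[i, j]])) b) PySem.Dict.empty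
      = (cells.map (fun c => (key c, c))).foldl
          (fun b p => b.modify p.1 [] (fun l => l ++ [p.2])) PySem.Dict.empty := by
    rw [hcells, List.map_flatMap, List.foldl_flatMap]
    apply PySem.List.foldl_congr_mem
    intro b i _
    rw [List.map_map, List.foldl_map]
    apply PySem.List.foldl_congr_mem
    intro b' j _
    simp [hkeyij]
  rw [hbucket]
  set bucket := (cells.map (fun c => (key c, c))).foldl
    (fun b p => b.modify p.1 [] (fun l => l ++ [p.2])) PySem.Dict.empty with hb
  have hkeys : bucket.keys = PySem.Set.ofList (cells.map key) := by
    rw [hb, PySem.Dict.keys_foldl_modify_key (cells.map (fun c => (key c, c)))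
      (fun p => p.1) [] (fun _ p => fun l => l ++ [p.2]) PySem.Dict.empty]
    rw [PySem.Dict.keys_empty, PySem.Set.update_eq_append_filter, List.map_map]
    simp [PySem.Set.contains, Function.comp_def]
  have hgetD : ∀ d, bucket.getD d [] = cells.filter (fun c => key c == d) := by
    intro d
    rw [hb, PySem.Dict.getD_foldl_modify_append, PySem.Dict.getD_empty]
    rw [List.filter_map, List.map_map]
    simp [Function.comp_def]
  rw [hkeys, PySem.List.foldl_append_eq_flatMap, List.nil_append]
  rw [List.flatMap_congr (fun d _ => hgetD d)]
  exact (stable_sort_groups key cells).symm
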